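-- pv_equiv track=rewrite | github.com/e-BitReadPaper/e-BitRead | RL/test_ppo.py | choose_action_closest
-- ===== SOURCE A (Python) =====
-- def takeSecond(elem):
--     return elem[1]
--
-- def choose_action_closest(choosableList, reqBI):
--     dist = []
--     for i in range(len(choosableList) - 1):
--         if choosableList[i] == 1:
--             dist.append([i, abs(reqBI - i)])
--     if len(dist) == 0:
--         return 5
--     dist.sort(key=takeSecond)
--     return dist[0][0]
-- ===== SOURCE B (Python) =====
-- def choose_action_closest(choosableList, reqBI):
--     # One pass keeping the first (index, distance) pair with minimal distance:
--     # no intermediate list, no sort.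
--     best = None
--     for i in range(len(choosableList) - 1):
--         if choosableList[i] == 1:
--             d = abs(reqBI - i)
--             if best is None or d < best[1]:
--                 best = (i, d)
--     return 5 if best is None else best[0]
-- ===== Notes on version B (the rewrite author's own statement) =====
-- stated objective: simpler
-- what changed: B replaces building a list of (index,distance) pairs and sorting it by distance with a single running-argmin pass (strict '<' preserves A's stable-sort smallest-index tie-break).
import Mathlib
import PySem

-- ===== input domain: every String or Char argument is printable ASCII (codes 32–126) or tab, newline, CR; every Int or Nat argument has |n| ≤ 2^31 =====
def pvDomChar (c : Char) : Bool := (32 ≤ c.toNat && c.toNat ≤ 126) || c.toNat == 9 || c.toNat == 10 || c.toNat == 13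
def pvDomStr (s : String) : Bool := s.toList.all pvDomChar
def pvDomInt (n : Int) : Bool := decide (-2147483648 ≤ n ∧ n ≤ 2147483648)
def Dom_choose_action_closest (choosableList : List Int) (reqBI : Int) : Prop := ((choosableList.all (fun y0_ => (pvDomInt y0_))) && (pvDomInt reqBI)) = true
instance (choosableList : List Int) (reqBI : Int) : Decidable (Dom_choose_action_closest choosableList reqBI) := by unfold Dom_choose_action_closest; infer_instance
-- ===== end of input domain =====

-- B replaces A's collect-pairs-then-sort with a single running-argmin pass (strict '<'
-- keeps the first, i.e. smallest-index, minimum — the same answer as A's stable sort).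

-- ===== PORT A =====
def takeSecond (elem : Int × Int) : Int := elem.2

def choose_action_closest (choosableList : List Int) (reqBI : Int) : Int :=
  let dist := (PySem.List.pyRange 0 ((choosableList.length : Int) - 1) 1).foldl
    (fun acc i =>
      if PySem.List.pyGetD choosableList i 0 == 1 then acc ++ [(i, |reqBI - i|)] else acc)
    ([] : List (Int × Int))
  if dist.length == 0 then 5
  else ((PySem.List.sorted dist takeSecond false).headD (0, 0)).1

-- ===== PORT B =====
def choose_action_closest_alt (choosableList : List Int) (reqBI : Int) : Int :=
  let best := (PySem.List.pyRange 0 ((choosableList.length : Int) - 1) 1).foldl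
    (fun best i =>
      if PySem.List.pyGetD choosableList i 0 == 1 then
        let d := |reqBI - i|
        match best with
        | none => some (i, d)
        | some b => if d < b.2 then some (i, d) else some b
      else best)
    (none : Option (Int × Int))
  match best with
  | none => 5
  | some b => b.1

-- ===== PRECONDITION & SPEC =====
def Spec_choose_action_closest (choosableList : List Int) (reqBI : Int) (out : Int) : Prop := out = choose_action_closest_alt choosableList reqBI
instance (choosableList : List Int) (reqBI : Int) (out : Int) : Decidable (Spec_choose_action_closest choosableList reqBI out) := by unfold Spec_choose_action_closest; infer_instance

-- ===== CLAIM (what is proved, stated in full; the proofs are below) =====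
def Claim_equal_choose_action_closest : Prop := ∀ (choosableList : List Int) (reqBI : Int), Dom_choose_action_closest choosableList reqBI → Spec_choose_action_closest choosableList reqBI (choose_action_closest choosableList reqBI)

-- ===== LEMMAS AND PROOFS =====

-- B's accumulator update, on an already filtered-and-mapped element.
def pvStep (o : Option (Int × Int)) (p : Int × Int) : Option (Int × Int) :=
  match o with
  | none => some p
  | some b => if p.2 < b.2 then some p else some b

theorem pv_head?_insertBy (x : Int × Int) (ys : List (Int × Int)) :
    (PySem.List.insertBy (fun a b => decide (takeSecond a < takeSecond b)) x ys).head? =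
      pvStep ys.head? x := by
  cases ys with
  | nil => simp [PySem.List.insertBy, pvStep]
  | cons y t =>
      simp only [PySem.List.insertBy, takeSecond, pvStep, List.head?_cons]
      by_cases h : x.2 < y.2 <;> simp [h]

theorem pv_foldl_insertBy_head? (ds : List (Int × Int)) (acc : List (Int × Int)) :
    (ds.foldl (fun acc x => PySem.List.insertBy (fun a b => decide (takeSecond a < takeSecond b)) x acc) acc).head? =
      ds.foldl pvStep acc.head? := by
  induction ds generalizing acc with
  | nil => rfl
  | cons d t ih => simp only [List.foldl_cons, ih, pv_head?_insertBy]

theorem pv_head_sorted (ds : List (Int × Int)) :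
    (PySem.List.sorted ds takeSecond false).head? = ds.foldl pvStep none := by
  rw [PySem.List.sorted_eq_foldl_insertBy, pv_foldl_insertBy_head?]
  rfl

theorem pv_alt_fold (l : List Int) (reqBI : Int) (xs : List Int) (o : Option (Int × Int)) :
    xs.foldl
      (fun best i =>
        if PySem.List.pyGetD l i 0 == 1 then
          let d := |reqBI - i|
          match best with
          | none => some (i, d)
          | some b => if d < b.2 then some (i, d) else some b
        else best) o =
    ((xs.filter (fun i => PySem.List.pyGetD l i 0 == 1)).map (fun i => (i, |reqBI - i|))).foldl pvStep o := by
  rw [List.foldl_map, List.foldl_filter]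
  have hfun : (fun (best : Option (Int × Int)) i =>
      if PySem.List.pyGetD l i 0 == 1 then
        let d := |reqBI - i|
        match best with
        | none => some (i, d)
        | some b => if d < b.2 then some (i, d) else some b
      else best) =
      (fun (b : Option (Int × Int)) i =>
        if (PySem.List.pyGetD l i 0 == 1) = true then pvStep b (i, |reqBI - i|) else b) := by
    funext b i
    cases b <;> by_cases h : PySem.List.pyGetD l i 0 == 1 <;> simp [h, pvStep]
  rw [hfun]

theorem choose_action_closest_eq (l : List Int) (reqBI : Int) :
    choose_action_closest l reqBI = choose_action_closest_alt l reqBI := by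
  unfold choose_action_closest choose_action_closest_alt
  rw [PySem.List.foldl_append_if, pv_alt_fold]
  simp only [List.nil_append]
  set ds := ((PySem.List.pyRange 0 ((l.length : Int) - 1) 1).filter
      (fun i => PySem.List.pyGetD l i 0 == 1)).map (fun i => (i, |reqBI - i|)) with hds
  cases hd : ds with
  | nil => simp
  | cons d t =>
      have hne : ds ≠ [] := by simp [hd]
      have hlen : (ds.length == 0) = false := by simp [hd]
      have hsne : PySem.List.sorted ds takeSecond false ≠ [] := by
        simpa [Ne, PySem.List.sorted_eq_nil_iff] using hne
      have hhead := pv_head_sorted ds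
      cases hs : PySem.List.sorted ds takeSecond false with
      | nil => exact absurd hs hsne
      | cons m t' =>
          rw [hs] at hhead
          simp only [List.head?_cons] at hhead
          rw [← hd, hlen]
          simp [hs, ← hhead]

-- ===== VERDICT (by name: the statement is the Claim_ definition above) =====
theorem choose_action_closest_spec : Claim_equal_choose_action_closest := by
  intro l reqBI _
  unfold Spec_choose_action_closest
  exact choose_action_closest_eq l reqBI
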